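-- pv_equiv track=rewrite | github.com/BA78/poker-game | game.py | _find_consecutive_ranks
-- ===== SOURCE A (Python) =====
-- def _find_consecutive_ranks(ranks):
--     """연속된 숫자들 찾기"""
--     best_consecutive = []
--     current_consecutive = [ranks[0]]
--
--     for i in range(1, len(ranks)):
--         if ranks[i] - ranks[i-1] <= 2:  # 2 이하의 차이는 연속으로 간주
--             current_consecutive.append(ranks[i])
--         else:
--             if len(current_consecutive) > len(best_consecutive):
--                 best_consecutive = current_consecutive[:]
--             current_consecutive = [ranks[i]]
--
--     if len(current_consecutive) > len(best_consecutive):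
--         best_consecutive = current_consecutive
--
--     return best_consecutive
-- ===== SOURCE B (Python) =====
-- def _find_consecutive_ranks(ranks):
--     """연속된 숫자들 찾기 — label each element with its run id, count ids, pick the most common id."""
--     ids = [0]
--     for prev, cur in zip(ranks, ranks[1:]):
--         ids.append(ids[-1] + (cur - prev > 2))
--     counts = {}
--     for r in ids:
--         counts[r] = counts.get(r, 0) + 1
--     best = max(counts, key=counts.get)
--     return [x for x, r in zip(ranks, ids) if r == best]
-- ===== Notes on version B (the rewrite author's own statement) =====
-- stated objective: alternative
-- what changed: B never keeps runs as lists: it labels every element with a run id (prefix count of >2 gaps), tallies the ids in a dict, takes the id with the maximal count (first on ties, matching A), and returns the elements carrying that id by one filtering pass, instead of A's best/current run bookkeeping.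
import Mathlib
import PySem

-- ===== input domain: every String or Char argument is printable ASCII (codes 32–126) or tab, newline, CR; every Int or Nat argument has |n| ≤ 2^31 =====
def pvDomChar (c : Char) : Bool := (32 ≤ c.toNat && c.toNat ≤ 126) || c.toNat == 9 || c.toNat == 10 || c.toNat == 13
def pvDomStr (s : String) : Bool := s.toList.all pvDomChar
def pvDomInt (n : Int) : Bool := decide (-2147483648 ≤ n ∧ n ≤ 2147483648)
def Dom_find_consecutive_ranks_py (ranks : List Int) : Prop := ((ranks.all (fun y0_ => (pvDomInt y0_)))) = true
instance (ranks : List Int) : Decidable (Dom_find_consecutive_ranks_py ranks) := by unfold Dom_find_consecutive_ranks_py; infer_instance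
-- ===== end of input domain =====

-- B labels every element with a run id, tallies the ids in a dict, and returns the elements of the
-- id with the maximal tally (first on ties), instead of A's best/current run bookkeeping;
-- objective: alternative algorithm (same cost).
-- ===== PORT A =====
def find_consecutive_ranks_py (ranks : List Int) : List Int :=
  let st := (PySem.List.pyRange 1 (ranks.length : Int)).foldl
    (fun (st : List Int × List Int) i =>
      if (PySem.List.pyGet? ranks i).getD 0 - (PySem.List.pyGet? ranks (i-1)).getD 0 ≤ 2 then
        (st.1, st.2 ++ [(PySem.List.pyGet? ranks i).getD 0])
      else if st.2.length > st.1.length then (st.2, [(PySem.List.pyGet? ranks i).getD 0])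
      else (st.1, [(PySem.List.pyGet? ranks i).getD 0]))
    ([], [(PySem.List.pyGet? ranks 0).getD 0])
  if st.2.length > st.1.length then st.2 else st.1

-- ===== PORT B =====
-- ids[-1] on the always-nonempty ids is getLastD 0; counts.get(k) on a present key is getD k 0.
def find_consecutive_ranks_py_alt (ranks : List Int) : List Int :=
  let ids := (ranks.zip (PySem.List.slice ranks (some 1))).foldl
    (fun (ids : List Int) pc => ids ++ [ids.getLastD 0 + (if pc.2 - pc.1 > 2 then 1 else 0)]) [0]
  let counts := ids.foldl (fun (d : PySem.Dict Int Int) r => d.insert r (d.getD r 0 + 1)) PySem.Dict.empty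
  let best := (PySem.List.max? counts.keys (fun k => counts.getD k 0)).getD 0
  ((ranks.zip ids).filter (fun p => p.2 == best)).map Prod.fst

-- ===== PRECONDITION & SPEC =====
-- Pre_ excludes only the empty list, on which A (ranks[0]) raises IndexError.
def Pre_find_consecutive_ranks_py (ranks : List Int) : Prop := ranks ≠ []
instance (ranks : List Int) : Decidable (Pre_find_consecutive_ranks_py ranks) := by unfold Pre_find_consecutive_ranks_py; infer_instance
def pvWitness_find_consecutive_ranks_py : List Int := [3, 4, 9, 10, 12]
def Spec_find_consecutive_ranks_py (ranks : List Int) (out : List Int) : Prop := out = find_consecutive_ranks_py_alt ranks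
instance (ranks : List Int) (out : List Int) : Decidable (Spec_find_consecutive_ranks_py ranks out) := by unfold Spec_find_consecutive_ranks_py; infer_instance

-- ===== CLAIM (what is proved, stated in full; the proofs are below) =====
def Claim_equal_find_consecutive_ranks_py : Prop := ∀ (ranks : List Int), Dom_find_consecutive_ranks_py ranks → Pre_find_consecutive_ranks_py ranks → Spec_find_consecutive_ranks_py ranks (find_consecutive_ranks_py ranks)
-- ===== LEMMAS AND PROOFS =====

-- Proof-side names for the loop bodies, over consecutive pairs.
def pvStepA (st : List Int × List Int) (pc : Int × Int) : List Int × List Int :=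
  if pc.2 - pc.1 ≤ 2 then (st.1, st.2 ++ [pc.2])
  else if st.2.length > st.1.length then (st.2, [pc.2]) else (st.1, [pc.2])

def pvStepB (segs : List (List Int)) (pc : Int × Int) : List (List Int) :=
  if pc.2 - pc.1 ≤ 2 then segs.dropLast ++ [segs.getLastD [] ++ [pc.2]]
  else segs ++ [[pc.2]]

def pvStepI (ids : List Int) (pc : Int × Int) : List Int :=
  ids ++ [ids.getLastD 0 + (if pc.2 - pc.1 > 2 then 1 else 0)]

def pvBest (b c : List Int) : List Int := if c.length > b.length then c else b

-- run-id labels of a segment decomposition, and the list of its run ids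
def pvLabels : List (List Int) → Int → List Int
  | [], _ => []
  | s :: t, k => List.replicate s.length k ++ pvLabels t (k+1)

def pvKRange : List (List Int) → Int → List Int
  | [], _ => []
  | _ :: t, k => k :: pvKRange t (k+1)

-- pyGet? only looks at the prefix when the index is in range of it
theorem pvGet_append_left {α : Type} (ys : List α) (z : α) {i : Int}
    (h0 : 0 ≤ i) (h1 : i < (ys.length : Int)) :
    PySem.List.pyGet? (ys ++ [z]) i = PySem.List.pyGet? ys i := by
  simp only [PySem.List.pyGet?, PySem.List.pyIdx?, List.length_append, List.length_cons,
    List.length_nil]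
  have hi : i < ((ys.length + 1 : Nat) : Int) := by push_cast; omega
  rw [if_pos h0, if_pos h0, if_pos hi, if_pos h1]
  simp only [Option.bind_some]
  exact List.getElem?_append_left (by omega)

-- the last element, fetched by index
theorem pvGet_last (l : List Int) (h : l ≠ []) :
    PySem.List.pyGet? l ((l.length : Int) - 1) = some (l.getLast h) := by
  have hn : 0 < l.length := List.length_pos_iff.mpr h
  simp only [PySem.List.pyGet?, PySem.List.pyIdx?]
  rw [if_pos (by omega), if_pos (by omega)]
  have ht : ((l.length : Int) - 1).toNat = l.length - 1 := by omega
  simp only [Option.bind_some, ht]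
  rw [List.getLast_eq_getElem, List.getElem?_eq_getElem (by omega)]

theorem pvGet_concat_len (ys : List Int) (z : Int) :
    PySem.List.pyGet? (ys ++ [z]) (ys.length : Int) = some z := by
  simp only [PySem.List.pyGet?, PySem.List.pyIdx?, List.length_append, List.length_cons,
    List.length_nil]
  rw [if_pos (by positivity), if_pos (by push_cast; omega)]
  simp only [Option.bind_some, Int.toNat_natCast]
  exact List.getElem?_concat_length

-- A's index loop over range(1, len) reading ranks[i-1], ranks[i] is a fold over consecutive pairs
theorem pvFold_pairs {β : Type} (f : β → Int × Int → β) (ranks : List Int) (init : β) :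
    (PySem.List.pyRange 1 (ranks.length : Int)).foldl
      (fun st i => f st ((PySem.List.pyGet? ranks (i-1)).getD 0, (PySem.List.pyGet? ranks i).getD 0)) init
    = (ranks.zip ranks.tail).foldl f init := by
  induction ranks using List.reverseRecOn generalizing init with
  | nil => simp [PySem.List.pyRange]
  | append_singleton ys z ih =>
    rcases eq_or_ne ys [] with rfl | hys
    · simp [PySem.List.pyRange]
    · have hlen : 1 ≤ (ys.length : Int) := by
        have := List.length_pos_iff.mpr hys; omega
      have hrange : PySem.List.pyRange 1 ((ys ++ [z]).length : Int)
          = PySem.List.pyRange 1 (ys.length : Int) ++ [(ys.length : Int)] := by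
        rw [List.length_append]
        push_cast
        exact PySem.List.pyRange_one_succ_right hlen
      rw [hrange, List.foldl_append]
      have hcongr : (PySem.List.pyRange 1 (ys.length : Int)).foldl
          (fun st i => f st ((PySem.List.pyGet? (ys ++ [z]) (i-1)).getD 0, (PySem.List.pyGet? (ys ++ [z]) i).getD 0)) init
          = (PySem.List.pyRange 1 (ys.length : Int)).foldl
          (fun st i => f st ((PySem.List.pyGet? ys (i-1)).getD 0, (PySem.List.pyGet? ys i).getD 0)) init := by
        apply PySem.List.foldl_congr_mem
        intro acc x hx
        rw [PySem.List.mem_pyRange_one] at hx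
        rw [pvGet_append_left ys z (by omega) (by omega),
            pvGet_append_left ys z (by omega) (by omega)]
      rw [hcongr, ih]
      have hpairs : (ys ++ [z]).zip ((ys ++ [z]).tail)
          = ys.zip ys.tail ++ [(ys.getLast hys, z)] := by
        clear ih hrange hcongr hlen
        obtain ⟨y0, ys', rfl⟩ := List.exists_cons_of_ne_nil hys
        induction ys' generalizing y0 with
        | nil => simp
        | cons y1 t ih2 => simpa using ih2 y1 (by simp)
      rw [hpairs, List.foldl_append]
      simp only [List.foldl_cons, List.foldl_nil]
      have hgetlast : PySem.List.pyGet? (ys ++ [z]) ((ys.length : Int) - 1)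
          = some (ys.getLast hys) := by
        rw [pvGet_append_left ys z (by omega) (by omega)]
        exact pvGet_last ys hys
      rw [hgetlast, pvGet_concat_len]
      rfl

-- the invariant: A's (best, current) versus the segment decomposition
theorem pvInvariant (ps : List (Int × Int)) (x : Int) :
    (ps.foldl pvStepA ([], [x])).1 = (ps.foldl pvStepB [[x]]).dropLast.foldl pvBest []
    ∧ (ps.foldl pvStepA ([], [x])).2 = (ps.foldl pvStepB [[x]]).getLastD []
    ∧ (ps.foldl pvStepB [[x]]) ≠ []
    ∧ ∀ s ∈ (ps.foldl pvStepB [[x]]), s ≠ [] := by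
  induction ps using List.reverseRecOn with
  | nil => exact ⟨rfl, rfl, by simp, by simp⟩
  | append_singleton t pc ih =>
    obtain ⟨h1, h2, h3, h4⟩ := ih
    obtain ⟨segs', w, hEq⟩ := (t.foldl pvStepB [[x]]).eq_nil_or_concat.resolve_left h3
    rw [List.concat_eq_append] at hEq
    simp only [List.foldl_append, List.foldl_cons, List.foldl_nil]
    rw [hEq] at h1 h2 h4 ⊢
    simp only [List.dropLast_concat, List.getLastD_concat] at h1 h2
    generalize t.foldl pvStepA ([], [x]) = A at h1 h2 ⊢
    obtain ⟨b, c⟩ := A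
    simp only at h1 h2
    subst h1 h2
    unfold pvStepA pvStepB
    split_ifs with hc hlen
    · refine ⟨?_, ?_, ?_, ?_⟩
      · simp
      · simp
      · simp
      · intro s hs
        simp only [List.dropLast_concat, List.getLastD_concat] at hs
        rcases List.mem_append.mp hs with hs | hs
        · exact h4 s (List.mem_append_left [c] hs)
        · simp only [List.mem_singleton] at hs; subst hs; simp
    · refine ⟨?_, ?_, ?_, ?_⟩
      · simp only [List.dropLast_concat, List.foldl_append,
          List.foldl_cons, List.foldl_nil]
        have hlen' : c.length > (List.foldl pvBest [] segs').length := hlen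
        simp only [pvBest]
        rw [if_pos hlen']
      · simp
      · simp
      · intro s hs
        rcases List.mem_append.mp hs with hs | hs
        · exact h4 s hs
        · simp only [List.mem_singleton] at hs; subst hs; simp
    · refine ⟨?_, ?_, ?_, ?_⟩
      · simp only [List.dropLast_concat, List.foldl_append,
          List.foldl_cons, List.foldl_nil]
        have hlen' : ¬ c.length > (List.foldl pvBest [] segs').length := hlen
        simp only [pvBest]
        rw [if_neg hlen']
      · simp
      · simp
      · intro s hs
        rcases List.mem_append.mp hs with hs | hs
        · exact h4 s hs
        · simp only [List.mem_singleton] at hs; subst hs; simp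

-- A's final comparison folds the last segment in as well
theorem pvA_eq (ps : List (Int × Int)) (x : Int) :
    (if (ps.foldl pvStepA ([], [x])).2.length > (ps.foldl pvStepA ([], [x])).1.length
     then (ps.foldl pvStepA ([], [x])).2 else (ps.foldl pvStepA ([], [x])).1)
    = (ps.foldl pvStepB [[x]]).foldl pvBest [] := by
  obtain ⟨h1, h2, h3, _⟩ := pvInvariant ps x
  obtain ⟨segs', w, hEq⟩ := (ps.foldl pvStepB [[x]]).eq_nil_or_concat.resolve_left h3
  rw [List.concat_eq_append] at hEq
  rw [hEq] at h1 h2 ⊢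
  simp only [List.dropLast_concat, List.getLastD_concat] at h1 h2
  rw [List.foldl_append, List.foldl_cons, List.foldl_nil, ← h1, ← h2]
  unfold pvBest
  split_ifs <;> rfl

theorem pvLabels_append (T : List (List Int)) (s : List Int) :
    ∀ k : Int, pvLabels (T ++ [s]) k = pvLabels T k ++ List.replicate s.length (k + T.length) := by
  induction T with
  | nil => intro k; simp [pvLabels]
  | cons u t ih =>
    intro k
    simp only [List.cons_append, pvLabels, ih (k+1), List.append_assoc, List.length_cons]
    congr 3
    push_cast
    ring

-- the ids loop builds exactly the labels of the segment decomposition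
theorem pvIdsInvariant (ps : List (Int × Int)) (x : Int) :
    ps.foldl pvStepI [0] = pvLabels (ps.foldl pvStepB [[x]]) 0 := by
  induction ps using List.reverseRecOn with
  | nil => simp [pvLabels]
  | append_singleton t pc ih =>
    obtain ⟨_, _, h3, h4⟩ := pvInvariant t x
    obtain ⟨segs', w, hEq⟩ := (t.foldl pvStepB [[x]]).eq_nil_or_concat.resolve_left h3
    rw [List.concat_eq_append] at hEq
    have hw : w ≠ [] := h4 w (by rw [hEq]; simp)
    obtain ⟨n, hn⟩ : ∃ n, w.length = n + 1 := by
      rcases Nat.exists_eq_add_of_lt (List.length_pos_iff.mpr hw) with ⟨n, hn⟩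
      exact ⟨n, by omega⟩
    simp only [List.foldl_append, List.foldl_cons, List.foldl_nil]
    rw [ih, hEq]
    have hlab : pvLabels (segs' ++ [w]) 0
        = (pvLabels segs' 0 ++ List.replicate n (0 + (segs'.length : Int))) ++ [0 + (segs'.length : Int)] := by
      rw [pvLabels_append, hn, List.replicate_succ', ← List.append_assoc]
    have hlast : (pvLabels (segs' ++ [w]) 0).getLastD 0 = 0 + (segs'.length : Int) := by
      rw [hlab, List.getLastD_concat]
    unfold pvStepI pvStepB
    by_cases hgt : pc.2 - pc.1 > 2
    · rw [if_pos hgt, if_neg (by omega)]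
      rw [pvLabels_append (segs' ++ [w]) [pc.2] 0, hlast]
      simp only [List.length_cons, List.length_nil, List.length_append, List.replicate_succ,
        List.replicate_zero]
      push_cast
      simp [add_comm, add_left_comm]
    · rw [if_neg hgt, if_pos (by omega)]
      rw [List.dropLast_concat, List.getLastD_concat, hlast]
      have hlab2 : pvLabels (segs' ++ [w ++ [pc.2]]) 0
          = (pvLabels segs' 0 ++ List.replicate n (0 + (segs'.length : Int)))
            ++ [0 + (segs'.length : Int)] ++ [0 + (segs'.length : Int)] := by
        rw [pvLabels_append, List.length_append, hn]
        have : (n + 1 + [pc.2].length) = (n + 1) + 1 := by simp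
        rw [this, List.replicate_succ', List.replicate_succ']
        simp [List.append_assoc]
      rw [hlab2, hlab]
      simp

-- flatten of the segment decomposition is the original list
theorem pvFlatten (ps : List (Int × Int)) (x : Int) :
    (ps.foldl pvStepB [[x]]).flatten = x :: ps.map Prod.snd := by
  induction ps using List.reverseRecOn with
  | nil => simp
  | append_singleton t pc ih =>
    obtain ⟨_, _, h3, _⟩ := pvInvariant t x
    obtain ⟨segs', w, hEq⟩ := (t.foldl pvStepB [[x]]).eq_nil_or_concat.resolve_left h3
    rw [List.concat_eq_append] at hEq
    simp only [List.foldl_append, List.foldl_cons, List.foldl_nil, List.map_append]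
    rw [hEq] at ih ⊢
    unfold pvStepB
    split_ifs with hc
    · rw [List.dropLast_concat, List.getLastD_concat]
      simp only [List.flatten_append, List.flatten_cons, List.flatten_nil,
        List.append_nil] at ih ⊢
      rw [← List.append_assoc, ih]
      simp
    · simp only [List.flatten_append, List.flatten_cons, List.flatten_nil,
        List.append_nil] at ih ⊢
      rw [ih]
      simp

-- every label of pvLabels S k is ≥ k
theorem pvLabels_ge (S : List (List Int)) : ∀ (k x : Int), x ∈ pvLabels S k → k ≤ x := by
  induction S with
  | nil => intro k x hx; simp [pvLabels] at hx
  | cons s t ih =>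
    intro k x hx
    simp only [pvLabels, List.mem_append, List.mem_replicate] at hx
    rcases hx with ⟨_, rfl⟩ | hx
    · omega
    · have := ih (k+1) x hx; omega

-- the number of elements labelled k+j is the length of segment j
theorem pvCount_labels (S : List (List Int)) :
    ∀ (k : Int) (j : Nat) (h : j < S.length), (pvLabels S k).count (k + (j : Int)) = S[j].length := by
  induction S with
  | nil => intro _ j h; simp at h
  | cons s t ih =>
    intro k j h
    simp only [pvLabels, List.count_append]
    cases j with
    | zero =>
      have hz : (pvLabels t (k+1)).count (k + (0:Nat)) = 0 := by
        rw [List.count_eq_zero]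
        intro hmem
        have := pvLabels_ge t (k+1) _ hmem
        omega
      rw [hz]
      simp
    | succ j' =>
      have hr : (List.replicate s.length k).count (k + ((j'+1 : Nat) : Int)) = 0 := by
        rw [List.count_eq_zero]
        intro hmem
        have := (List.mem_replicate.mp hmem).2
        omega
      rw [hr]
      have := ih (k+1) j' (by simpa using Nat.lt_of_succ_lt_succ h)
      simpa [add_assoc, add_comm, add_left_comm] using this
    
-- the distinct labels, in first-occurrence order, are k, k+1, …
theorem pvOfList_labels (S : List (List Int)) (hne : ∀ s ∈ S, s ≠ []) :
    ∀ k : Int, PySem.Set.ofList (pvLabels S k) = pvKRange S k := by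
  induction S with
  | nil => intro k; simp [pvLabels, pvKRange, PySem.Set.ofList_nil]
  | cons s t ih =>
    intro k
    have hs : s ≠ [] := hne s (by simp)
    obtain ⟨n, hn⟩ : ∃ n, s.length = n + 1 := by
      rcases Nat.exists_eq_add_of_lt (List.length_pos_iff.mpr hs) with ⟨n, hn⟩
      exact ⟨n, by omega⟩
    have hrep : ∀ m : Nat, PySem.Set.ofList (List.replicate (m+1) k) = [k] := by
      intro m
      induction m with
      | zero => rfl
      | succ m ihm =>
        rw [List.replicate_succ', PySem.Set.ofList_append_singleton, ihm]
        simp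
    simp only [pvLabels, pvKRange]
    rw [PySem.Set.ofList_append, hn, hrep n]
    rw [PySem.Set.update_eq_append_filter]
    rw [ih (fun u hu => hne u (by simp [hu])) (k+1)]
    have hfilt : (pvKRange t (k+1)).filter (fun y => !(PySem.Set.contains [k] y)) = pvKRange t (k+1) := by
      rw [List.filter_eq_self]
      intro a ha
      have hge : k + 1 ≤ a := by
        have : a ∈ pvLabels t (k+1) := by
          have : pvKRange t (k+1) = PySem.Set.ofList (pvLabels t (k+1)) :=
            (ih (fun u hu => hne u (by simp [hu])) (k+1)).symm
          rw [this] at ha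
          exact (PySem.Set.mem_ofList _ _).mp ha
        exact pvLabels_ge t (k+1) a this
      simp [PySem.Set.contains]
      omega
    rw [hfilt]
    rfl

-- max? over a nonempty list is the strict-first fold
theorem pvMax_foldl (f : Int → Int) (t : List Int) :
    ∀ x : Int, PySem.List.max? (x :: t) f
      = some (t.foldl (fun b c => if f b < f c then c else b) x) := by
  induction t with
  | nil => intro x; rfl
  | cons c t ih =>
    intro x
    have h1 : PySem.List.max? (x :: c :: t) f
        = PySem.List.max? ((if f x < f c then c else x) :: t) f := by
      simp only [PySem.List.max?, List.foldl_cons]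
      split_ifs <;> rfl
    rw [h1, ih, List.foldl_cons]

-- the parallel selection: argmax over run ids versus first-longest fold over segments
theorem pvSel (f : Int → Int) (t : List (List Int)) :
    ∀ (k i : Int) (b : List Int),
      f i = (b.length : Int) →
      (∀ (j : Nat) (h : j < t.length), f (k + (j : Int)) = (t[j].length : Int)) →
      ∃ (r : Int) (res : List Int),
        (pvKRange t k).foldl (fun b' c => if f b' < f c then c else b') i = r
        ∧ t.foldl pvBest b = res
        ∧ f r = (res.length : Int)
        ∧ ((r = i ∧ res = b) ∨ ∃ (j : Nat) (h : j < t.length), r = k + (j : Int) ∧ res = t[j]) := by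
  induction t with
  | nil =>
    intro k i b hfi _
    exact ⟨i, b, rfl, rfl, hfi, Or.inl ⟨rfl, rfl⟩⟩
  | cons s t ih =>
    intro k i b hfi hf
    have hfk : f k = (s.length : Int) := by simpa using hf 0 (by simp)
    have hcond : (f i < f k) ↔ (s.length > b.length) := by
      rw [hfi, hfk]; constructor <;> intro h <;> exact_mod_cast h
    simp only [pvKRange, List.foldl_cons]
    have hstep : (if f i < f k then k else i) = if s.length > b.length then k else i := by
      split_ifs with h1 h2
      · rfl
      · exact absurd (hcond.mp h1) h2
      · exact absurd (hcond.mpr ‹_›) h1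
      · rfl
    rw [hstep]
    have hbval : pvBest b s = if s.length > b.length then s else b := rfl
    rw [hbval]
    have hf' : ∀ (j : Nat) (h : j < t.length), f ((k+1) + (j : Int)) = (t[j].length : Int) := by
      intro j hj
      have := hf (j+1) (by simpa using Nat.succ_lt_succ hj)
      simpa [add_assoc, add_comm, add_left_comm] using this
    by_cases hgt : s.length > b.length
    · rw [if_pos hgt, if_pos hgt]
      obtain ⟨r, res, hr, hres, hfr, hcase⟩ := ih (k+1) k s hfk hf'
      refine ⟨r, res, hr, hres, hfr, ?_⟩
      rcases hcase with ⟨rfl, rfl⟩ | ⟨j, hj, rfl, rfl⟩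
      · exact Or.inr ⟨0, by simp, by simp, by simp⟩
      · exact Or.inr ⟨j+1, by simpa using Nat.succ_lt_succ hj, by push_cast; ring, by simp⟩
    · rw [if_neg hgt, if_neg hgt]
      obtain ⟨r, res, hr, hres, hfr, hcase⟩ := ih (k+1) i b hfi hf'
      refine ⟨r, res, hr, hres, hfr, ?_⟩
      rcases hcase with ⟨rfl, rfl⟩ | ⟨j, hj, rfl, rfl⟩
      · exact Or.inl ⟨rfl, rfl⟩
      · exact Or.inr ⟨j+1, by simpa using Nat.succ_lt_succ hj, by push_cast; ring, by simp⟩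

-- zipping a list with a constant-label replicate
theorem pvZip_replicate (s : List Int) (k : Int) :
    s.zip (List.replicate s.length k) = s.map (fun x => (x, k)) := by
  induction s with
  | nil => rfl
  | cons a t ih => simp [List.replicate_succ, ih]

-- filtering the flattened list by the label of segment j returns segment j
theorem pvFilter_labels (S : List (List Int)) :
    ∀ (k : Int) (j : Nat) (h : j < S.length),
      ((S.flatten.zip (pvLabels S k)).filter (fun p => p.2 == k + (j : Int))).map Prod.fst = S[j] := by
  induction S with
  | nil => intro _ j h; simp at h
  | cons s t ih =>
    intro k j h
    have hzip : (s ++ t.flatten).zip (List.replicate s.length k ++ pvLabels t (k+1))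
        = s.zip (List.replicate s.length k) ++ t.flatten.zip (pvLabels t (k+1)) := by
      apply List.zip_append
      simp
    simp only [List.flatten_cons, pvLabels, hzip, List.filter_append, List.map_append]
    rw [pvZip_replicate]
    cases j with
    | zero =>
      have h1 : ((s.map (fun x => (x, k))).filter (fun p => p.2 == k + ((0:Nat) : Int))).map Prod.fst = s := by
        simp [List.filter_map, Function.comp_def]
      have h2 : ((t.flatten.zip (pvLabels t (k+1))).filter (fun p => p.2 == k + ((0:Nat) : Int))).map Prod.fst = [] := by
        rw [List.map_eq_nil_iff, List.filter_eq_nil_iff]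
        intro p hp
        have hmem := List.of_mem_zip hp
        have := pvLabels_ge t (k+1) p.2 hmem.2
        simp only [beq_iff_eq]
        push_cast
        omega
      rw [h1, h2]
      simp
    | succ j' =>
      have h1 : ((s.map (fun x => (x, k))).filter (fun p => p.2 == k + ((j'+1 : Nat) : Int))).map Prod.fst = [] := by
        rw [List.map_eq_nil_iff, List.filter_eq_nil_iff]
        intro p hp
        simp only [List.mem_map] at hp
        obtain ⟨x, _, rfl⟩ := hp
        simp only [beq_iff_eq]
        push_cast
        omega
      have h2 := ih (k+1) j' (by simpa using Nat.lt_of_succ_lt_succ h)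
      rw [h1]
      have : k + ((j'+1 : Nat) : Int) = (k+1) + (j' : Int) := by push_cast; ring
      rw [this, h2]
      simp

-- ===== VERDICT (by name: the statement is the Claim_ definition above) =====
theorem find_consecutive_ranks_py_spec : Claim_equal_find_consecutive_ranks_py := by
  intro ranks _ hpre
  unfold Spec_find_consecutive_ranks_py
  unfold find_consecutive_ranks_py find_consecutive_ranks_py_alt
  rw [PySem.List.slice_from ranks (by norm_num)]
  simp only [Int.toNat_one]
  rw [List.drop_one]
  obtain ⟨a, tl, rfl⟩ := List.exists_cons_of_ne_nil hpre
  have hhead : (PySem.List.pyGet? (a :: tl) 0).getD 0 = a := by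
    simp [PySem.List.pyGet?, PySem.List.pyIdx?]
  -- A side: index loop = pair fold = pvStepA fold, final if = pvBest fold over segments
  have hbody : (PySem.List.pyRange 1 ((a :: tl).length : Int)).foldl
      (fun (st : List Int × List Int) i =>
        if (PySem.List.pyGet? (a :: tl) i).getD 0 - (PySem.List.pyGet? (a :: tl) (i-1)).getD 0 ≤ 2 then
          (st.1, st.2 ++ [(PySem.List.pyGet? (a :: tl) i).getD 0])
        else if st.2.length > st.1.length then (st.2, [(PySem.List.pyGet? (a :: tl) i).getD 0])
        else (st.1, [(PySem.List.pyGet? (a :: tl) i).getD 0]))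
      ([], [(PySem.List.pyGet? (a :: tl) 0).getD 0])
      = ((a :: tl).zip (a :: tl).tail).foldl pvStepA ([], [a]) := by
    rw [hhead]
    rw [← pvFold_pairs pvStepA (a :: tl) ([], [a])]
    apply PySem.List.foldl_congr_mem
    intro acc x _
    simp [pvStepA]
  rw [hbody]
  have hpsEq : (a :: tl).zip (a :: tl).tail = (a :: tl).zip tl := by simp
  rw [hpsEq]
  rw [pvA_eq ((a :: tl).zip tl) a]
  -- B side: ids fold = pvStepI fold = labels of the segments
  have hids : ((a :: tl).zip tl).foldl (fun (ids : List Int) pc =>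
        ids ++ [ids.getLastD 0 + (if pc.2 - pc.1 > 2 then 1 else 0)]) [0]
      = ((a :: tl).zip tl).foldl pvStepI [0] := rfl
  rw [hids, pvIdsInvariant ((a :: tl).zip tl) a]
  obtain ⟨_, _, hS3, hS4⟩ := pvInvariant ((a :: tl).zip tl) a
  have hflat := pvFlatten ((a :: tl).zip tl) a
  rcases hSc : ((a :: tl).zip tl).foldl pvStepB [[a]] with _ | ⟨s0, t0⟩
  · exact absurd hSc hS3
  rw [hSc] at hS4 hflat
  have hs0 : s0 ≠ [] := hS4 s0 (by simp)
  -- the counting dict is the counter; its keys are the labels' kRange, values are counts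
  rw [PySem.Dict.foldl_insert_getD_add_one_eq_counter]
  rw [PySem.Dict.keys_counter, pvOfList_labels (s0 :: t0) hS4 0]
  set f : Int → Int := fun k => (PySem.Dict.counter (pvLabels (s0 :: t0) 0)).getD k 0 with hfdef
  have hfc : ∀ (k : Int), f k = ((pvLabels (s0 :: t0) 0).count k : Int) := by
    intro k; rw [hfdef]; exact PySem.Dict.getD_counter _ _
  have hf0 : f 0 = (s0.length : Int) := by
    have hcl := pvCount_labels (s0 :: t0) 0 0 (by simp)
    simp only [List.getElem_cons_zero] at hcl
    have hcl' : (pvLabels (s0 :: t0) 0).count (0 : Int) = s0.length := by simpa using hcl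
    rw [hfc]
    exact_mod_cast hcl'
  have hft : ∀ (j : Nat) (h : j < t0.length), f (1 + (j : Int)) = (t0[j].length : Int) := by
    intro j hj
    have hcl := pvCount_labels (s0 :: t0) 0 (j+1) (by simpa using Nat.succ_lt_succ hj)
    simp only [List.getElem_cons_succ] at hcl
    have harg : (0 : Int) + ((j+1 : Nat) : Int) = 1 + (j : Int) := by push_cast; ring
    rw [harg] at hcl
    rw [hfc]
    exact_mod_cast hcl
  obtain ⟨r, res, hr, hres, hfr, hcase⟩ := pvSel f t0 1 0 s0 hf0 hft
  have hmax : (PySem.List.max? (pvKRange (s0 :: t0) 0) f).getD 0 = r := by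
    have : pvKRange (s0 :: t0) 0 = 0 :: pvKRange t0 1 := rfl
    rw [this, pvMax_foldl f (pvKRange t0 1) 0, Option.getD_some, hr]
  rw [hmax]
  -- the A-side fold over the segments equals res
  have hAres : (s0 :: t0).foldl pvBest [] = res := by
    rw [List.foldl_cons]
    have : pvBest [] s0 = s0 := by
      unfold pvBest
      rw [if_pos (by simpa using List.length_pos_iff.mpr hs0)]
    rw [this, hres]
  rw [hAres]
  -- express r as a valid index J of the segments with res the J-th segment
  obtain ⟨J, hJ, hrJ, hresJ⟩ : ∃ (J : Nat) (h : J < (s0 :: t0).length),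
      r = (0 : Int) + (J : Int) ∧ res = (s0 :: t0)[J] := by
    rcases hcase with ⟨rfl, rfl⟩ | ⟨j, hj, rfl, rfl⟩
    · exact ⟨0, by simp, by simp, by simp⟩
    · exact ⟨j+1, by simpa using Nat.succ_lt_succ hj, by push_cast; ring, by simp⟩
  -- the zip(ranks, ids) filter returns segment J
  have hsnd : ((a :: tl).zip tl).map Prod.snd = tl := List.map_snd_zip (by simp)
  have hzip : (a :: tl).zip (pvLabels (s0 :: t0) 0)
      = (s0 :: t0).flatten.zip (pvLabels (s0 :: t0) 0) := by
    rw [hflat, hsnd]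
  rw [hzip, hrJ, hresJ]
  exact (pvFilter_labels (s0 :: t0) 0 J hJ).symm
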